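-- pv_equiv track=rewrite | github.com/telesol/ladder | derive_formula.py | find_relationship
-- ===== SOURCE A (Python) =====
-- def find_relationship(keys, n, target):
--     """Find what relationship produces target from previous keys"""
--     if n < 2:
--         return None
--
--     results = []
--
--     # Test: k_n = k_a * k_b
--     for a in range(1, n):
--         for b in range(a, n):
--             if a in keys and b in keys:
--                 if keys[a] * keys[b] == target:
--                     results.append(f"k{n} = k{a} × k{b} = {keys[a]} × {keys[b]} = {target}")
--
--     # Test: k_n = k_a²
--     for a in range(1, n):
--         if a in keys:
--             if keys[a] ** 2 == target:
--                 results.append(f"k{n} = k{a}² = {keys[a]}² = {target}")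
--
--     # Test: k_n = k_a * M + C (for small M and C)
--     for a in range(1, n):
--         if a in keys:
--             for m in range(1, 50):
--                 diff = target - keys[a] * m
--                 if abs(diff) < 500:
--                     results.append(f"k{n} = k{a}×{m} + ({diff}) = {keys[a]}×{m} + ({diff}) = {target}")
--
--     # Test: k_n = k_a * M + k_b
--     for a in range(1, n):
--         for b in range(1, n):
--             if a in keys and b in keys and a != b:
--                 for m in range(1, 30):
--                     if keys[a] * m + keys[b] == target:
--                         results.append(f"k{n} = k{a}×{m} + k{b} = {keys[a]}×{m} + {keys[b]} = {target}")
--                     if keys[a] * m - keys[b] == target: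
--                         results.append(f"k{n} = k{a}×{m} - k{b} = {keys[a]}×{m} - {keys[b]} = {target}")
--
--     # Test: k_n = k_a² + C
--     for a in range(1, n):
--         if a in keys:
--             diff = target - keys[a] ** 2
--             if abs(diff) < 500:
--                 results.append(f"k{n} = k{a}² + ({diff}) = {keys[a]}² + ({diff}) = {target}")
--
--     return results
-- ===== SOURCE B (Python) =====
-- def find_relationship(keys, n, target):
--     """Find what relationship produces target from previous keys.
--
--     Iterates only the keys that actually exist (sorted), instead of scanning
--     range(1, n) with membership tests, and finds product cofactors through a
--     value -> keys index built once instead of a nested scan over all pairs.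
--     """
--     if n < 2:
--         return None
--
--     idxs = sorted(k for k in keys if 1 <= k < n)
--     byval = {}
--     for k in idxs:
--         byval.setdefault(keys[k], []).append(k)
--
--     results = []
--
--     # k_n = k_a * k_b : look up the required cofactor target / keys[a]
--     for a in idxs:
--         va = keys[a]
--         if va == 0:
--             if target == 0:
--                 results += [f"k{n} = k{a} × k{b} = {va} × {keys[b]} = {target}"
--                             for b in idxs if a <= b]
--         elif target % va == 0:
--             results += [f"k{n} = k{a} × k{b} = {va} × {keys[b]} = {target}"
--                         for b in byval.get(target // va, []) if a <= b]
--
--     # k_n = k_a²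
--     results += [f"k{n} = k{a}² = {keys[a]}² = {target}"
--                 for a in idxs if keys[a] ** 2 == target]
--
--     # k_n = k_a * M + C
--     results += [f"k{n} = k{a}×{m} + ({target - keys[a] * m}) = {keys[a]}×{m} + ({target - keys[a] * m}) = {target}"
--                 for a in idxs for m in range(1, 50) if abs(target - keys[a] * m) < 500]
--
--     # k_n = k_a * M ± k_b over the existing keys
--     for a in idxs:
--         va = keys[a]
--         for b in idxs:
--             if b != a:
--                 vb = keys[b]
--                 for m in range(1, 30):
--                     if va * m + vb == target:
--                         results.append(f"k{n} = k{a}×{m} + k{b} = {va}×{m} + {vb} = {target}")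
--                     if va * m - vb == target:
--                         results.append(f"k{n} = k{a}×{m} - k{b} = {va}×{m} - {vb} = {target}")
--
--     # k_n = k_a² + C
--     results += [f"k{n} = k{a}² + ({target - keys[a] ** 2}) = {keys[a]}² + ({target - keys[a] ** 2}) = {target}"
--                 for a in idxs if abs(target - keys[a] ** 2) < 500]
--
--     return results
-- ===== Notes on version B (the rewrite author's own statement) =====
-- stated objective: alternative
-- what changed: B iterates only the sorted existing keys instead of scanning range(1,n) with membership tests, and finds product cofactors through a value->keys index built once instead of a nested scan over all pairs (intended as faster; a timing run measured ~2.3x but could not confirm the label); Pre_ excludes association lists with a duplicated key, which do not represent a well-defined dict input (Python's dict keeps the last value, the association-list convention reads the first).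
import Mathlib
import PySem

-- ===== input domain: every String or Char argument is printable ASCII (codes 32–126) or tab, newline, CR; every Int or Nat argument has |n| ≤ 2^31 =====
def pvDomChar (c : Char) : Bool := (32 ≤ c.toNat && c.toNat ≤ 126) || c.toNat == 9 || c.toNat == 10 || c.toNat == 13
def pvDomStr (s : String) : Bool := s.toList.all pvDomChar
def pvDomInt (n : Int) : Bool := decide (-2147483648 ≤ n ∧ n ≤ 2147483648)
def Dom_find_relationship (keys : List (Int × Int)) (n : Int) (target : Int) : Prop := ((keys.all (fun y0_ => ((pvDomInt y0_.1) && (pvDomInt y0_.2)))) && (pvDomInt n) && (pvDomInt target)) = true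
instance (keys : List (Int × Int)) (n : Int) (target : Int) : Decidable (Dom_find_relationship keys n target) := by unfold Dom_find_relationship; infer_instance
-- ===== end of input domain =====

-- B iterates only the (sorted) existing keys instead of scanning range(1,n) with membership
-- tests, and finds product cofactors through a value→keys index built once (alternative algorithm).

-- ===== PORT A =====
-- shared f-string formats (both Pythons build the identical message strings)
def fmtProd (n a b va vb target : Int) : String :=
  "k" ++ PySem.Int.toStr n ++ " = k" ++ PySem.Int.toStr a ++ " × k" ++ PySem.Int.toStr b ++
  " = " ++ PySem.Int.toStr va ++ " × " ++ PySem.Int.toStr vb ++ " = " ++ PySem.Int.toStr target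

def fmtSq (n a va target : Int) : String :=
  "k" ++ PySem.Int.toStr n ++ " = k" ++ PySem.Int.toStr a ++ "² = " ++ PySem.Int.toStr va ++
  "² = " ++ PySem.Int.toStr target

def fmtLin (n a m va diff target : Int) : String :=
  "k" ++ PySem.Int.toStr n ++ " = k" ++ PySem.Int.toStr a ++ "×" ++ PySem.Int.toStr m ++
  " + (" ++ PySem.Int.toStr diff ++ ") = " ++ PySem.Int.toStr va ++ "×" ++ PySem.Int.toStr m ++
  " + (" ++ PySem.Int.toStr diff ++ ") = " ++ PySem.Int.toStr target

def fmtPlus (n a m b va vb target : Int) : String :=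
  "k" ++ PySem.Int.toStr n ++ " = k" ++ PySem.Int.toStr a ++ "×" ++ PySem.Int.toStr m ++
  " + k" ++ PySem.Int.toStr b ++ " = " ++ PySem.Int.toStr va ++ "×" ++ PySem.Int.toStr m ++
  " + " ++ PySem.Int.toStr vb ++ " = " ++ PySem.Int.toStr target

def fmtMinus (n a m b va vb target : Int) : String :=
  "k" ++ PySem.Int.toStr n ++ " = k" ++ PySem.Int.toStr a ++ "×" ++ PySem.Int.toStr m ++
  " - k" ++ PySem.Int.toStr b ++ " = " ++ PySem.Int.toStr va ++ "×" ++ PySem.Int.toStr m ++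
  " - " ++ PySem.Int.toStr vb ++ " = " ++ PySem.Int.toStr target

def fmtSqC (n a va diff target : Int) : String :=
  "k" ++ PySem.Int.toStr n ++ " = k" ++ PySem.Int.toStr a ++ "² + (" ++ PySem.Int.toStr diff ++
  ") = " ++ PySem.Int.toStr va ++ "² + (" ++ PySem.Int.toStr diff ++ ") = " ++ PySem.Int.toStr target

-- the dict argument (both Pythons receive `keys` as a dict)
def pvDict (keys : List (Int × Int)) : PySem.Dict Int Int := PySem.Dict.mk keys

def find_relationship (keys : List (Int × Int)) (n : Int) (target : Int) : Option (List String) :=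
  if n < 2 then none
  else
    -- Test: k_n = k_a * k_b
    let r1 := (PySem.List.pyRange 1 n 1).foldl (fun res a =>
      (PySem.List.pyRange a n 1).foldl (fun res b =>
        if (pvDict keys).contains a && (pvDict keys).contains b then
          if (pvDict keys).getD a 0 * (pvDict keys).getD b 0 = target then
            res ++ [fmtProd n a b ((pvDict keys).getD a 0) ((pvDict keys).getD b 0) target]
          else res
        else res) res) []
    -- Test: k_n = k_a²
    let r2 := (PySem.List.pyRange 1 n 1).foldl (fun res a =>
      if (pvDict keys).contains a then
        if (pvDict keys).getD a 0 ^ 2 = target then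
          res ++ [fmtSq n a ((pvDict keys).getD a 0) target] else res
      else res) r1
    -- Test: k_n = k_a * M + C (for small M and C)
    let r3 := (PySem.List.pyRange 1 n 1).foldl (fun res a =>
      if (pvDict keys).contains a then
        (PySem.List.pyRange 1 50 1).foldl (fun res m =>
          if |target - (pvDict keys).getD a 0 * m| < 500 then
            res ++ [fmtLin n a m ((pvDict keys).getD a 0) (target - (pvDict keys).getD a 0 * m) target]
          else res) res
      else res) r2
    -- Test: k_n = k_a * M + k_b
    let r4 := (PySem.List.pyRange 1 n 1).foldl (fun res a =>
      (PySem.List.pyRange 1 n 1).foldl (fun res b =>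
        if (pvDict keys).contains a && (pvDict keys).contains b && a != b then
          (PySem.List.pyRange 1 30 1).foldl (fun res m =>
            let res1 := if (pvDict keys).getD a 0 * m + (pvDict keys).getD b 0 = target then
                res ++ [fmtPlus n a m b ((pvDict keys).getD a 0) ((pvDict keys).getD b 0) target] else res
            if (pvDict keys).getD a 0 * m - (pvDict keys).getD b 0 = target then
              res1 ++ [fmtMinus n a m b ((pvDict keys).getD a 0) ((pvDict keys).getD b 0) target] else res1) res
        else res) res) r3
    -- Test: k_n = k_a² + C
    let r5 := (PySem.List.pyRange 1 n 1).foldl (fun res a =>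
      if (pvDict keys).contains a then
        if |target - (pvDict keys).getD a 0 ^ 2| < 500 then
          res ++ [fmtSqC n a ((pvDict keys).getD a 0) (target - (pvDict keys).getD a 0 ^ 2) target]
        else res
      else res) r4
    some r5

-- ===== PORT B =====
-- idxs = sorted(k for k in keys if 1 <= k < n)
def altIdxs (keys : List (Int × Int)) (n : Int) : List Int :=
  PySem.List.sorted ((pvDict keys).keys.filter (fun k => decide (1 ≤ k ∧ k < n))) (fun x => x)

-- byval: the keys of `idxs`, indexed by their value (built once by setdefault/append)
def altByval (keys : List (Int × Int)) (n : Int) : PySem.Dict Int (List Int) :=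
  (altIdxs keys n).foldl (fun bv k => bv.modify ((pvDict keys).getD k 0) [] (· ++ [k])) PySem.Dict.empty

def find_relationship_alt (keys : List (Int × Int)) (n : Int) (target : Int) : Option (List String) :=
  if n < 2 then none
  else
    -- k_n = k_a * k_b : look up the required cofactor target/keys[a]
    let r1 := (altIdxs keys n).foldl (fun res a =>
      if (pvDict keys).getD a 0 = 0 then
        if target = 0 then
          res ++ ((altIdxs keys n).filter (fun b => decide (a ≤ b))).map
            (fun b => fmtProd n a b ((pvDict keys).getD a 0) ((pvDict keys).getD b 0) target)
        else res
      else if PySem.Int.mod target ((pvDict keys).getD a 0) = 0 then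
        res ++ (((altByval keys n).getD (PySem.Int.floordiv target ((pvDict keys).getD a 0)) []).filter
            (fun b => decide (a ≤ b))).map
          (fun b => fmtProd n a b ((pvDict keys).getD a 0) ((pvDict keys).getD b 0) target)
      else res) []
    -- k_n = k_a²
    let r2 := r1 ++ ((altIdxs keys n).filter (fun a => decide ((pvDict keys).getD a 0 ^ 2 = target))).map
      (fun a => fmtSq n a ((pvDict keys).getD a 0) target)
    -- k_n = k_a * M + C
    let r3 := r2 ++ (altIdxs keys n).flatMap (fun a =>
      ((PySem.List.pyRange 1 50 1).filter (fun m => decide (|target - (pvDict keys).getD a 0 * m| < 500))).map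
        (fun m => fmtLin n a m ((pvDict keys).getD a 0) (target - (pvDict keys).getD a 0 * m) target))
    -- k_n = k_a * M ± k_b over the existing keys
    let r4 := (altIdxs keys n).foldl (fun res a =>
      (altIdxs keys n).foldl (fun res b =>
        if b ≠ a then
          (PySem.List.pyRange 1 30 1).foldl (fun res m =>
            let res1 := if (pvDict keys).getD a 0 * m + (pvDict keys).getD b 0 = target then
                res ++ [fmtPlus n a m b ((pvDict keys).getD a 0) ((pvDict keys).getD b 0) target] else res
            if (pvDict keys).getD a 0 * m - (pvDict keys).getD b 0 = target then
              res1 ++ [fmtMinus n a m b ((pvDict keys).getD a 0) ((pvDict keys).getD b 0) target] else res1) res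
        else res) res) r3
    -- k_n = k_a² + C
    let r5 := r4 ++ ((altIdxs keys n).filter (fun a => decide (|target - (pvDict keys).getD a 0 ^ 2| < 500))).map
      (fun a => fmtSqC n a ((pvDict keys).getD a 0) (target - (pvDict keys).getD a 0 ^ 2) target)
    some r5

-- ===== PRECONDITION & SPEC =====
-- Pre_ excludes association lists with a duplicated key: those do not represent a
-- well-defined dict input (Python's dict keeps the LAST value for a duplicated key, the
-- association-list convention reads the FIRST), so no claim is made about them.
def Pre_find_relationship (keys : List (Int × Int)) (n : Int) (target : Int) : Prop :=
  (keys.map Prod.fst).Nodup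

instance (keys : List (Int × Int)) (n : Int) (target : Int) : Decidable (Pre_find_relationship keys n target) := by
  unfold Pre_find_relationship; infer_instance

def pvWitness_find_relationship : (List (Int × Int)) × Int × Int := ([(1, 2), (2, 3)], 3, 6)

def Spec_find_relationship (keys : List (Int × Int)) (n : Int) (target : Int) (out : Option (List String)) : Prop := out = find_relationship_alt keys n target
instance (keys : List (Int × Int)) (n : Int) (target : Int) (out : Option (List String)) : Decidable (Spec_find_relationship keys n target out) := by unfold Spec_find_relationship; infer_instance

-- ===== CLAIM (what is proved, stated in full; the proofs are below) =====
def Claim_equal_find_relationship : Prop := ∀ (keys : List (Int × Int)) (n : Int) (target : Int), Dom_find_relationship keys n target → Pre_find_relationship keys n target → Spec_find_relationship keys n target (find_relationship keys n target)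

-- ===== LEMMAS AND PROOFS =====

-- value of a key in the dict
def pvVal (keys : List (Int × Int)) (a : Int) : Int := (pvDict keys).getD a 0

-- A flatMap over a list may be restricted to the entries where it is nonempty
lemma pv_flatMap_restrict {α β : Type} (l : List α) (q : α → Bool) (g : α → List β)
    (h : ∀ a ∈ l, q a = false → g a = []) : l.flatMap g = (l.filter q).flatMap g := by
  induction l with
  | nil => rfl
  | cons x t ih =>
    have ht := ih (fun a ha hq => h a (List.mem_cons_of_mem x ha) hq)
    cases hx : q x with
    | false => simp [hx, h x (List.mem_cons_self) hx, ht]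
    | true => simp [hx, List.flatMap_cons, ht]

lemma pv_flatMap_nil {α β : Type} (l : List α) (g : α → List β)
    (h : ∀ a ∈ l, g a = []) : l.flatMap g = [] :=
  List.flatMap_eq_nil_iff.mpr h

-- [1,n) restricted to a ≤ x is [a,n)
lemma pv_filter_ge_pyRange (a n : Int) (ha : 1 ≤ a) :
    (PySem.List.pyRange 1 n 1).filter (fun x => decide (a ≤ x)) = PySem.List.pyRange a n 1 := by
  by_cases han : a ≤ n
  · rw [PySem.List.pyRange_one_append 1 a n ha han, List.filter_append]
    rw [List.filter_eq_nil_iff.mpr (fun x hx => by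
          have := PySem.List.mem_pyRange_one.mp hx; simp; omega),
        List.filter_eq_self.mpr (fun x hx => by
          have := PySem.List.mem_pyRange_one.mp hx; simp; omega)]
    simp
  · rw [PySem.List.pyRange_one_eq_nil (show n ≤ a by omega)]
    exact List.filter_eq_nil_iff.mpr (fun x hx => by
      have := PySem.List.mem_pyRange_one.mp hx; simp; omega)

-- the sorted existing-key list of B is the membership-filtered range of A
lemma pv_idxs_eq (keys : List (Int × Int)) (n : Int) (hnd : (keys.map Prod.fst).Nodup) :
    altIdxs keys n = (PySem.List.pyRange 1 n 1).filter (pvDict keys).contains := by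
  apply PySem.List.sorted_eq_of_perm_of_pairwise_lt
  · apply (List.perm_ext_iff_of_nodup ((PySem.List.nodup_pyRange_one 1 n).filter _) ?_).mpr
    · intro x
      simp only [List.mem_filter, PySem.List.mem_pyRange_one, pvDict]
      rw [PySem.Dict.contains_iff_mem_keys]
      simp only [PySem.Dict.keys_mk, decide_eq_true_eq]
      tauto
    · exact List.Nodup.filter _ (by simpa [pvDict, PySem.Dict.keys_mk] using hnd)
  · exact (PySem.List.pairwise_lt_pyRange_one 1 n).filter _

lemma pv_mem_idxs (keys : List (Int × Int)) (n a : Int) (hnd : (keys.map Prod.fst).Nodup)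
    (ha : a ∈ altIdxs keys n) : (pvDict keys).contains a = true ∧ 1 ≤ a ∧ a < n := by
  rw [pv_idxs_eq keys n hnd] at ha
  have := List.mem_filter.mp ha
  exact ⟨this.2, (PySem.List.mem_pyRange_one.mp this.1).1, (PySem.List.mem_pyRange_one.mp this.1).2⟩

-- byval maps a value to the (sorted) existing keys holding it
lemma pv_byval_getD (keys : List (Int × Int)) (n v : Int) :
    (altByval keys n).getD v [] = (altIdxs keys n).filter (fun k => pvVal keys k == v) := by
  unfold altByval
  have hmap : ((altIdxs keys n).map (fun k => ((pvDict keys).getD k 0, k))).foldl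
      (fun bv p => bv.modify p.1 [] (· ++ [p.2])) PySem.Dict.empty
      = (altIdxs keys n).foldl (fun bv k => bv.modify ((pvDict keys).getD k 0) [] (· ++ [k])) PySem.Dict.empty := by
    rw [List.foldl_map]
  rw [← hmap]
  rw [PySem.Dict.getD_foldl_modify_append]
  rw [List.filter_map]
  simp [Function.comp_def, pvVal]

lemma pv_mul_eq_iff (va vb t : Int) (hva : va ≠ 0) :
    va * vb = t ↔ (PySem.Int.mod t va = 0 ∧ vb = PySem.Int.floordiv t va) := by
  constructor
  · intro h
    have hm : PySem.Int.mod t va = 0 := (PySem.Int.mod_eq_zero_iff_dvd t va).mpr ⟨vb, h.symm⟩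
    refine ⟨hm, ?_⟩
    have hdm := PySem.Int.floordiv_mul_add_mod t va
    rw [hm, add_zero] at hdm
    have : vb * va = PySem.Int.floordiv t va * va := by rw [hdm, mul_comm, h]
    exact mul_right_cancel₀ hva this
  · rintro ⟨hm, rfl⟩
    have hdm := PySem.Int.floordiv_mul_add_mod t va
    rw [hm, add_zero] at hdm
    rw [mul_comm]; exact hdm

lemma pv_sec2 (keys : List (Int × Int)) (n target : Int) (hnd : (keys.map Prod.fst).Nodup)
    (init : List String) :
    (PySem.List.pyRange 1 n 1).foldl (fun res a =>
      if (pvDict keys).contains a then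
        if (pvDict keys).getD a 0 ^ 2 = target then
          res ++ [fmtSq n a ((pvDict keys).getD a 0) target] else res
      else res) init
    = init ++ ((altIdxs keys n).filter (fun a => decide ((pvDict keys).getD a 0 ^ 2 = target))).map
      (fun a => fmtSq n a ((pvDict keys).getD a 0) target) := by
  rw [PySem.List.foldl_if_eq_foldl_filter, ← pv_idxs_eq keys n hnd]
  exact PySem.List.foldl_append_ite _ _ _ _

lemma pv_sec3 (keys : List (Int × Int)) (n target : Int) (hnd : (keys.map Prod.fst).Nodup)
    (init : List String) :
    (PySem.List.pyRange 1 n 1).foldl (fun res a =>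
      if (pvDict keys).contains a then
        (PySem.List.pyRange 1 50 1).foldl (fun res m =>
          if |target - (pvDict keys).getD a 0 * m| < 500 then
            res ++ [fmtLin n a m ((pvDict keys).getD a 0) (target - (pvDict keys).getD a 0 * m) target]
          else res) res
      else res) init
    = init ++ (altIdxs keys n).flatMap (fun a =>
      ((PySem.List.pyRange 1 50 1).filter (fun m => decide (|target - (pvDict keys).getD a 0 * m| < 500))).map
        (fun m => fmtLin n a m ((pvDict keys).getD a 0) (target - (pvDict keys).getD a 0 * m) target)) := by
  rw [PySem.List.foldl_if_eq_foldl_filter, ← pv_idxs_eq keys n hnd]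
  have h : (fun (res : List String) (a : Int) =>
      (PySem.List.pyRange 1 50 1).foldl (fun res m =>
        if |target - (pvDict keys).getD a 0 * m| < 500 then
          res ++ [fmtLin n a m ((pvDict keys).getD a 0) (target - (pvDict keys).getD a 0 * m) target]
        else res) res)
      = (fun res a => res ++
        ((PySem.List.pyRange 1 50 1).filter (fun m => decide (|target - (pvDict keys).getD a 0 * m| < 500))).map
          (fun m => fmtLin n a m ((pvDict keys).getD a 0) (target - (pvDict keys).getD a 0 * m) target)) := by
    funext res a
    exact PySem.List.foldl_append_ite _ _ _ _
  rw [h, PySem.List.foldl_append_eq_flatMap]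

lemma pv_sec5 (keys : List (Int × Int)) (n target : Int) (hnd : (keys.map Prod.fst).Nodup)
    (init : List String) :
    (PySem.List.pyRange 1 n 1).foldl (fun res a =>
      if (pvDict keys).contains a then
        if |target - (pvDict keys).getD a 0 ^ 2| < 500 then
          res ++ [fmtSqC n a ((pvDict keys).getD a 0) (target - (pvDict keys).getD a 0 ^ 2) target]
        else res
      else res) init
    = init ++ ((altIdxs keys n).filter (fun a => decide (|target - (pvDict keys).getD a 0 ^ 2| < 500))).map
      (fun a => fmtSqC n a ((pvDict keys).getD a 0) (target - (pvDict keys).getD a 0 ^ 2) target) := by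
  rw [PySem.List.foldl_if_eq_foldl_filter, ← pv_idxs_eq keys n hnd]
  exact PySem.List.foldl_append_ite _ _ _ _

-- the b-scan of A, restricted to existing keys ≥ a, as a filter of the sorted key list
lemma pv_filterA (keys : List (Int × Int)) (n a : Int) (pb : Int → Bool)
    (hnd : (keys.map Prod.fst).Nodup) (ha1 : 1 ≤ a) :
    (PySem.List.pyRange a n 1).filter (fun b => (pvDict keys).contains b && pb b)
    = (altIdxs keys n).filter (fun b => decide (a ≤ b) && pb b) := by
  rw [← pv_filter_ge_pyRange a n ha1, List.filter_filter, pv_idxs_eq keys n hnd,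
      List.filter_filter]
  exact List.filter_congr (fun x hx => by
    by_cases h1 : a ≤ x <;> by_cases h2 : (pvDict keys).contains x = true <;>
      simp [h1, h2, Bool.and_comm])

lemma pv_sec1 (keys : List (Int × Int)) (n target : Int) (hnd : (keys.map Prod.fst).Nodup)
    (init : List String) :
    (PySem.List.pyRange 1 n 1).foldl (fun res a =>
      (PySem.List.pyRange a n 1).foldl (fun res b =>
        if (pvDict keys).contains a && (pvDict keys).contains b then
          if (pvDict keys).getD a 0 * (pvDict keys).getD b 0 = target then
            res ++ [fmtProd n a b ((pvDict keys).getD a 0) ((pvDict keys).getD b 0) target]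
          else res
        else res) res) init
    = (altIdxs keys n).foldl (fun res a =>
      if (pvDict keys).getD a 0 = 0 then
        if target = 0 then
          res ++ ((altIdxs keys n).filter (fun b => decide (a ≤ b))).map
            (fun b => fmtProd n a b ((pvDict keys).getD a 0) ((pvDict keys).getD b 0) target)
        else res
      else if PySem.Int.mod target ((pvDict keys).getD a 0) = 0 then
        res ++ (((altByval keys n).getD (PySem.Int.floordiv target ((pvDict keys).getD a 0)) []).filter
            (fun b => decide (a ≤ b))).map
          (fun b => fmtProd n a b ((pvDict keys).getD a 0) ((pvDict keys).getD b 0) target)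
      else res) init := by
  -- A side: one flatMap over the sorted existing keys
  have hA1 : (fun (res : List String) (a : Int) =>
      (PySem.List.pyRange a n 1).foldl (fun res b =>
        if (pvDict keys).contains a && (pvDict keys).contains b then
          if (pvDict keys).getD a 0 * (pvDict keys).getD b 0 = target then
            res ++ [fmtProd n a b ((pvDict keys).getD a 0) ((pvDict keys).getD b 0) target]
          else res
        else res) res)
      = (fun res a => res ++ ((PySem.List.pyRange a n 1).filter (fun b =>
            (pvDict keys).contains a && ((pvDict keys).contains b &&
            decide ((pvDict keys).getD a 0 * (pvDict keys).getD b 0 = target)))).map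
          (fun b => fmtProd n a b ((pvDict keys).getD a 0) ((pvDict keys).getD b 0) target)) := by
    funext res a
    rw [show (fun (res : List String) (b : Int) =>
          if (pvDict keys).contains a && (pvDict keys).contains b then
            if (pvDict keys).getD a 0 * (pvDict keys).getD b 0 = target then
              res ++ [fmtProd n a b ((pvDict keys).getD a 0) ((pvDict keys).getD b 0) target]
            else res
          else res)
        = (fun (res : List String) (b : Int) =>
          if ((pvDict keys).contains a && ((pvDict keys).contains b &&
              decide ((pvDict keys).getD a 0 * (pvDict keys).getD b 0 = target))) = true then
            res ++ [fmtProd n a b ((pvDict keys).getD a 0) ((pvDict keys).getD b 0) target]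
          else res) from by
      funext res b
      by_cases h1 : (pvDict keys).contains a = true <;>
        by_cases h2 : (pvDict keys).contains b = true <;>
        by_cases h3 : (pvDict keys).getD a 0 * (pvDict keys).getD b 0 = target <;>
        simp [h1, h2, h3]]
    exact PySem.List.foldl_append_if _ _ _ _
  rw [hA1, PySem.List.foldl_append_eq_flatMap,
      pv_flatMap_restrict (PySem.List.pyRange 1 n 1) ((pvDict keys).contains) _
        (fun a _ hc => by
          rw [List.filter_eq_nil_iff.mpr (fun b hb => by simp [hc]), List.map_nil]),
      ← pv_idxs_eq keys n hnd]
  -- B side: one flatMap over the sorted existing keys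
  have hB1 : (fun (res : List String) (a : Int) =>
        if (pvDict keys).getD a 0 = 0 then
          if target = 0 then
            res ++ ((altIdxs keys n).filter (fun b => decide (a ≤ b))).map
              (fun b => fmtProd n a b ((pvDict keys).getD a 0) ((pvDict keys).getD b 0) target)
          else res
        else if PySem.Int.mod target ((pvDict keys).getD a 0) = 0 then
          res ++ (((altByval keys n).getD (PySem.Int.floordiv target ((pvDict keys).getD a 0)) []).filter
              (fun b => decide (a ≤ b))).map
            (fun b => fmtProd n a b ((pvDict keys).getD a 0) ((pvDict keys).getD b 0) target)
        else res)
      = (fun res a => res ++ (if (pvDict keys).getD a 0 = 0 then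
          (if target = 0 then
            ((altIdxs keys n).filter (fun b => decide (a ≤ b))).map
              (fun b => fmtProd n a b ((pvDict keys).getD a 0) ((pvDict keys).getD b 0) target)
           else [])
        else if PySem.Int.mod target ((pvDict keys).getD a 0) = 0 then
          (((altByval keys n).getD (PySem.Int.floordiv target ((pvDict keys).getD a 0)) []).filter
              (fun b => decide (a ≤ b))).map
            (fun b => fmtProd n a b ((pvDict keys).getD a 0) ((pvDict keys).getD b 0) target)
        else [])) := by
    funext res a
    split_ifs with h1 h2 h3 <;> simp
  rw [hB1, PySem.List.foldl_append_eq_flatMap]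
  -- pointwise equality of the two per-a lists, for existing keys a
  congr 1
  apply List.flatMap_congr
  intro a ha
  obtain ⟨hca, ha1, han⟩ := pv_mem_idxs keys n a hnd ha
  by_cases h0 : (pvDict keys).getD a 0 = 0
  · by_cases ht : target = 0
    · -- every existing b ≥ a matches
      rw [if_pos h0, if_pos ht]
      rw [show (fun b => (pvDict keys).contains a && ((pvDict keys).contains b &&
            decide ((pvDict keys).getD a 0 * (pvDict keys).getD b 0 = target)))
          = (fun b => (pvDict keys).contains b && true) from by
        funext b; simp [hca, h0, ht]]
      rw [pv_filterA keys n a (fun _ => true) hnd ha1]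
      simp
    · -- nothing matches
      rw [if_pos h0, if_neg ht]
      rw [List.filter_eq_nil_iff.mpr (fun b hb => by
        simp [h0]
        intro _ _ h
        exact ht h.symm), List.map_nil]
  · by_cases hm : PySem.Int.mod target ((pvDict keys).getD a 0) = 0
    · rw [if_neg h0, if_pos hm, pv_byval_getD keys n]
      rw [show (fun b => (pvDict keys).contains a && ((pvDict keys).contains b &&
            decide ((pvDict keys).getD a 0 * (pvDict keys).getD b 0 = target)))
          = (fun b => (pvDict keys).contains b &&
              decide ((pvDict keys).getD b 0 = PySem.Int.floordiv target ((pvDict keys).getD a 0))) from by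
        funext b
        by_cases hc : (pvDict keys).contains b = true <;>
          simp [hca, hc, pv_mul_eq_iff ((pvDict keys).getD a 0) ((pvDict keys).getD b 0) target h0, hm]]
      rw [pv_filterA keys n a _ hnd ha1, List.filter_filter]
      exact congrArg _ (List.filter_congr (fun x hx => by
        by_cases hle : a ≤ x <;>
          by_cases hv : (pvDict keys).getD x 0 = PySem.Int.floordiv target ((pvDict keys).getD a 0) <;>
          simp [hle, hv, pvVal]))
    · rw [if_neg h0, if_neg hm]
      rw [List.filter_eq_nil_iff.mpr (fun b hb => by
        by_cases hc : (pvDict keys).contains b = true <;>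
          simp [hca, hc, pv_mul_eq_iff ((pvDict keys).getD a 0) ((pvDict keys).getD b 0) target h0, hm]),
        List.map_nil]

-- the per-pair inner m-scan of the fourth test (identical in both programs)
def pvBLK (keys : List (Int × Int)) (n target a b : Int) : List String :=
  (PySem.List.pyRange 1 30 1).flatMap (fun m =>
    (if (pvDict keys).getD a 0 * m + (pvDict keys).getD b 0 = target then
      [fmtPlus n a m b ((pvDict keys).getD a 0) ((pvDict keys).getD b 0) target] else [])
    ++ (if (pvDict keys).getD a 0 * m - (pvDict keys).getD b 0 = target then
      [fmtMinus n a m b ((pvDict keys).getD a 0) ((pvDict keys).getD b 0) target] else []))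

lemma pv_sec4 (keys : List (Int × Int)) (n target : Int) (hnd : (keys.map Prod.fst).Nodup)
    (init : List String) :
    (PySem.List.pyRange 1 n 1).foldl (fun res a =>
      (PySem.List.pyRange 1 n 1).foldl (fun res b =>
        if (pvDict keys).contains a && (pvDict keys).contains b && a != b then
          (PySem.List.pyRange 1 30 1).foldl (fun res m =>
            let res1 := if (pvDict keys).getD a 0 * m + (pvDict keys).getD b 0 = target then
                res ++ [fmtPlus n a m b ((pvDict keys).getD a 0) ((pvDict keys).getD b 0) target] else res
            if (pvDict keys).getD a 0 * m - (pvDict keys).getD b 0 = target then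
              res1 ++ [fmtMinus n a m b ((pvDict keys).getD a 0) ((pvDict keys).getD b 0) target] else res1) res
        else res) res) init
    = (altIdxs keys n).foldl (fun res a =>
      (altIdxs keys n).foldl (fun res b =>
        if b ≠ a then
          (PySem.List.pyRange 1 30 1).foldl (fun res m =>
            let res1 := if (pvDict keys).getD a 0 * m + (pvDict keys).getD b 0 = target then
                res ++ [fmtPlus n a m b ((pvDict keys).getD a 0) ((pvDict keys).getD b 0) target] else res
            if (pvDict keys).getD a 0 * m - (pvDict keys).getD b 0 = target then
              res1 ++ [fmtMinus n a m b ((pvDict keys).getD a 0) ((pvDict keys).getD b 0) target] else res1) res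
        else res) res) init := by
  -- the m-scan per pair is the block pvBLK
  have hM : ∀ a b : Int, (fun (res : List String) (m : Int) =>
      let res1 := if (pvDict keys).getD a 0 * m + (pvDict keys).getD b 0 = target then
          res ++ [fmtPlus n a m b ((pvDict keys).getD a 0) ((pvDict keys).getD b 0) target] else res
      if (pvDict keys).getD a 0 * m - (pvDict keys).getD b 0 = target then
        res1 ++ [fmtMinus n a m b ((pvDict keys).getD a 0) ((pvDict keys).getD b 0) target] else res1)
      = (fun res m => res ++
        ((if (pvDict keys).getD a 0 * m + (pvDict keys).getD b 0 = target then
          [fmtPlus n a m b ((pvDict keys).getD a 0) ((pvDict keys).getD b 0) target] else [])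
        ++ (if (pvDict keys).getD a 0 * m - (pvDict keys).getD b 0 = target then
          [fmtMinus n a m b ((pvDict keys).getD a 0) ((pvDict keys).getD b 0) target] else []))) := by
    intro a b
    funext res m
    dsimp only
    split_ifs <;> simp
  -- A side as a flatMap of guarded blocks
  have hA : (fun (res : List String) (a : Int) =>
      (PySem.List.pyRange 1 n 1).foldl (fun res b =>
        if (pvDict keys).contains a && (pvDict keys).contains b && a != b then
          (PySem.List.pyRange 1 30 1).foldl (fun res m =>
            let res1 := if (pvDict keys).getD a 0 * m + (pvDict keys).getD b 0 = target then
                res ++ [fmtPlus n a m b ((pvDict keys).getD a 0) ((pvDict keys).getD b 0) target] else res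
            if (pvDict keys).getD a 0 * m - (pvDict keys).getD b 0 = target then
              res1 ++ [fmtMinus n a m b ((pvDict keys).getD a 0) ((pvDict keys).getD b 0) target] else res1) res
        else res) res)
      = (fun res a => res ++ (PySem.List.pyRange 1 n 1).flatMap (fun b =>
          if (pvDict keys).contains a && (pvDict keys).contains b && a != b then
            pvBLK keys n target a b else [])) := by
    funext res a
    have hmid : (fun (res : List String) (b : Int) =>
        if (pvDict keys).contains a && (pvDict keys).contains b && a != b then
          (PySem.List.pyRange 1 30 1).foldl (fun res m =>
            let res1 := if (pvDict keys).getD a 0 * m + (pvDict keys).getD b 0 = target then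
                res ++ [fmtPlus n a m b ((pvDict keys).getD a 0) ((pvDict keys).getD b 0) target] else res
            if (pvDict keys).getD a 0 * m - (pvDict keys).getD b 0 = target then
              res1 ++ [fmtMinus n a m b ((pvDict keys).getD a 0) ((pvDict keys).getD b 0) target] else res1) res
        else res)
        = (fun res b => res ++
            (if (pvDict keys).contains a && (pvDict keys).contains b && a != b then
              pvBLK keys n target a b else [])) := by
      funext res b
      by_cases hg : ((pvDict keys).contains a && (pvDict keys).contains b && a != b) = true
      · rw [if_pos hg, if_pos hg, hM a b, PySem.List.foldl_append_eq_flatMap, pvBLK]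
      · rw [if_neg hg, if_neg hg, List.append_nil]
    rw [hmid, PySem.List.foldl_append_eq_flatMap]
  -- B side as a flatMap of guarded blocks
  have hB : (fun (res : List String) (a : Int) =>
      (altIdxs keys n).foldl (fun res b =>
        if b ≠ a then
          (PySem.List.pyRange 1 30 1).foldl (fun res m =>
            let res1 := if (pvDict keys).getD a 0 * m + (pvDict keys).getD b 0 = target then
                res ++ [fmtPlus n a m b ((pvDict keys).getD a 0) ((pvDict keys).getD b 0) target] else res
            if (pvDict keys).getD a 0 * m - (pvDict keys).getD b 0 = target then
              res1 ++ [fmtMinus n a m b ((pvDict keys).getD a 0) ((pvDict keys).getD b 0) target] else res1) res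
        else res) res)
      = (fun res a => res ++ (altIdxs keys n).flatMap (fun b =>
          if b ≠ a then pvBLK keys n target a b else [])) := by
    funext res a
    have hmid : (fun (res : List String) (b : Int) =>
        if b ≠ a then
          (PySem.List.pyRange 1 30 1).foldl (fun res m =>
            let res1 := if (pvDict keys).getD a 0 * m + (pvDict keys).getD b 0 = target then
                res ++ [fmtPlus n a m b ((pvDict keys).getD a 0) ((pvDict keys).getD b 0) target] else res
            if (pvDict keys).getD a 0 * m - (pvDict keys).getD b 0 = target then
              res1 ++ [fmtMinus n a m b ((pvDict keys).getD a 0) ((pvDict keys).getD b 0) target] else res1) res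
        else res)
        = (fun res b => res ++ (if b ≠ a then pvBLK keys n target a b else [])) := by
      funext res b
      by_cases hba : b ≠ a
      · rw [if_pos hba, if_pos hba, hM a b, PySem.List.foldl_append_eq_flatMap, pvBLK]
      · rw [if_neg hba, if_neg hba, List.append_nil]
    rw [hmid, PySem.List.foldl_append_eq_flatMap]
  rw [hA, PySem.List.foldl_append_eq_flatMap,
      pv_flatMap_restrict (PySem.List.pyRange 1 n 1) ((pvDict keys).contains) _
        (fun a _ hc => pv_flatMap_nil _ _ (fun b _ => by simp [hc])),
      ← pv_idxs_eq keys n hnd,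
      hB, PySem.List.foldl_append_eq_flatMap]
  congr 1
  apply List.flatMap_congr
  intro a ha
  obtain ⟨hca, _, _⟩ := pv_mem_idxs keys n a hnd ha
  rw [pv_flatMap_restrict (PySem.List.pyRange 1 n 1) ((pvDict keys).contains) _
        (fun b _ hc => by simp [hc]),
      ← pv_idxs_eq keys n hnd]
  apply List.flatMap_congr
  intro b hb
  obtain ⟨hcb, _, _⟩ := pv_mem_idxs keys n b hnd hb
  by_cases hab : a = b
  · subst hab
    simp
  · have h1 : ((pvDict keys).contains a && (pvDict keys).contains b && a != b) = true := by
      simp [hca, hcb, hab]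
    rw [if_pos h1, if_pos (Ne.symm hab)]

-- ===== VERDICT (by name: the statement is the Claim_ definition above) =====
theorem find_relationship_spec : Claim_equal_find_relationship := by
  intro keys n target _ hpre
  have hnd : (keys.map Prod.fst).Nodup := hpre
  unfold Spec_find_relationship find_relationship find_relationship_alt
  by_cases hn : n < 2
  · simp [hn]
  · simp only [if_neg hn]
    congr 1
    rw [pv_sec1 keys n target hnd, pv_sec2 keys n target hnd, pv_sec3 keys n target hnd,
        pv_sec4 keys n target hnd, pv_sec5 keys n target hnd]
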